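-- pv_equiv track=rewrite | github.com/daicang/Leetcode | 3237-alt-and-tab-simulation.py | simulationResult
-- ===== SOURCE A (Python) =====
-- from typing import List
--
-- def simulationResult(windows: List[int], queries: List[int]) -> List[int]:
--     result = []
--     moved = set()
--     for q in queries[::-1]:
--         if q not in moved:
--             moved.add(q)
--             result.append(q)
--
--     for i in windows:
--         if i not in moved:
--             result.append(i)
--
--     return result
-- ===== SOURCE B (Python) =====
-- from typing import List
--
-- def simulationResult(windows: List[int], queries: List[int]) -> List[int]:
--     od = {}
--     for q in queries:
--         od.pop(q, None)
--         od[q] = None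
--     out = list(reversed(od))
--     for w in windows:
--         if w not in od:
--             out.append(w)
--     return out
-- ===== Notes on version B (the rewrite author's own statement) =====
-- stated objective: alternative
-- what changed: Replaces A's reversed-pass with a set of seen queries by a single forward pass through an insertion-ordered dict that relocates each query to the end (pop then reinsert), reading the recency order off the reversed key list.
import Mathlib
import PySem

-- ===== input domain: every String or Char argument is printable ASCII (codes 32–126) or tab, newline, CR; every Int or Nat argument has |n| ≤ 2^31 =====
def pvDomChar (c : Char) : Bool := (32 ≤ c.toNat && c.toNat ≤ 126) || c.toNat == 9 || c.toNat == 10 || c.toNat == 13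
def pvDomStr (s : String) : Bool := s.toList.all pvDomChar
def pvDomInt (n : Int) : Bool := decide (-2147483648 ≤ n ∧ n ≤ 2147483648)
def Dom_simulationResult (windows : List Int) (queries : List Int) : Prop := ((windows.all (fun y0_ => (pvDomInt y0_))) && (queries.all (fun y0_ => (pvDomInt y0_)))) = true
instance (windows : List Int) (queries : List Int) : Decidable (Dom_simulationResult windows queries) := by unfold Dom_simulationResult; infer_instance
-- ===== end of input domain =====

-- B replaces A's reversed-scan-plus-set with a single forward pass through an insertion-ordered
-- dict that relocates each query to the end (alternative decomposition, same cost).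

-- ===== PORT A =====
-- A: result/moved built over queries[::-1] (first occurrence of the reversed list wins),
-- then windows whose value was never a query are appended in order.
def simulationResult (windows : List Int) (queries : List Int) : List Int :=
  let st := ((PySem.List.slice? queries none none (-1)).getD []).foldl
      (fun (st : List Int × PySem.Set Int) q =>
        if PySem.Set.contains st.2 q then st else (st.1 ++ [q], PySem.Set.add st.2 q))
      ([], PySem.Set.empty)
  windows.foldl (fun r i => if PySem.Set.contains st.2 i then r else r ++ [i]) st.1

-- ===== PORT B =====
-- B: od.pop(q, None) discards the value, so its effect on the dict is exactly erase;
-- od[q] = None then appends q at the end (the key is absent after the erase).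
def simulationResult_alt (windows : List Int) (queries : List Int) : List Int :=
  let od := queries.foldl
      (fun (d : PySem.Dict Int (Option Int)) q => (d.erase q).insert q none)
      PySem.Dict.empty
  let out := od.keys.reverse
  windows.foldl (fun r w => if od.contains w then r else r ++ [w]) out

-- ===== PRECONDITION & SPEC =====
def Spec_simulationResult (windows : List Int) (queries : List Int) (out : List Int) : Prop := out = simulationResult_alt windows queries
instance (windows : List Int) (queries : List Int) (out : List Int) : Decidable (Spec_simulationResult windows queries out) := by unfold Spec_simulationResult; infer_instance

-- ===== CLAIM (what is proved, stated in full; the proofs are below) =====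
def Claim_equal_simulationResult : Prop := ∀ (windows : List Int) (queries : List Int), Dom_simulationResult windows queries → Spec_simulationResult windows queries (simulationResult windows queries)

-- ===== LEMMAS AND PROOFS =====

-- A's dedup loop keeps result = moved (as lists), so the pair fold is Set.update twice over.
lemma foldA_eq_update (qs : List Int) (s : PySem.Set Int) :
    qs.foldl
      (fun (st : List Int × PySem.Set Int) q =>
        if PySem.Set.contains st.2 q then st else (st.1 ++ [q], PySem.Set.add st.2 q))
      (s, s)
    = (PySem.Set.update s qs, PySem.Set.update s qs) := by
  induction qs generalizing s with
  | nil => rfl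
  | cons q rest ih =>
      simp only [List.foldl_cons]
      have hstep :
          (if PySem.Set.contains s q then ((s : List Int), s)
           else (s ++ [q], PySem.Set.add s q)) = (PySem.Set.add s q, PySem.Set.add s q) := by
        by_cases hm : q ∈ s
        · simp [hm, PySem.Set.contains, List.contains_eq_mem]
        · simp [PySem.Set.add, PySem.Set.contains, List.contains_eq_mem, hm]
      rw [hstep, ih]
      rfl

-- keys after one relocation step: every old copy of q is filtered out, q appended.
lemma keys_relocate_step (d : PySem.Dict Int (Option Int)) (q : Int) :
    ((d.erase q).insert q none).keys = d.keys.filter (fun k => k != q) ++ [q] := by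
  have hkeys_erase : (d.erase q).keys = d.keys.filter (fun k => k != q) := by
    simp [PySem.Dict.erase, PySem.Dict.keys, List.filter_map, Function.comp_def, bne]
  have hnc : (d.erase q).contains q = false := by
    rw [PySem.Dict.contains_eq_decide_mem_keys, hkeys_erase]
    simp
  rw [PySem.Dict.keys_insert_of_not_contains _ _ hnc, hkeys_erase]

lemma nodup_keys_relocate_step (d : PySem.Dict Int (Option Int)) (q : Int)
    (h : d.keys.Nodup) : ((d.erase q).insert q none).keys.Nodup := by
  rw [keys_relocate_step]
  simp only [List.nodup_append, List.nodup_cons, List.not_mem_nil, not_false_iff,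
    List.nodup_nil, and_true, true_and]
  refine ⟨h.filter _, ?_⟩
  intro a ha
  simp only [List.mem_filter, bne_iff_ne, ne_eq] at ha
  simp [ha.2]

-- updating past an already-present element q ignores all copies of q.
lemma update_filter_ne (q : Int) :
    ∀ (m : List Int) (s : PySem.Set Int), q ∈ s →
      PySem.Set.update s (m.filter (fun x => x != q)) = PySem.Set.update s m := by
  intro m
  induction m with
  | nil => intro s _; rfl
  | cons x rest ih =>
      intro s hq
      by_cases hx : x = q
      · subst hx
        simp only [List.filter_cons, bne_self_eq_false, PySem.Set.update, List.foldl_cons]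
        rw [PySem.Set.add_of_mem hq]
        exact ih s hq
      · simp only [List.filter_cons, bne_iff_ne, ne_eq, hx, not_false_iff,
          PySem.Set.update, List.foldl_cons]
        exact ih (PySem.Set.add s x) ((PySem.Set.mem_add s x q).mpr (Or.inl hq))

-- a nodup list of fresh elements is appended verbatim by Set.update
lemma update_nodup_fresh :
    ∀ (l : List Int) (s : PySem.Set Int), l.Nodup → (∀ x ∈ l, x ∉ s) →
      PySem.Set.update s l = s ++ l := by
  intro l
  induction l with
  | nil => intro s _ _; simp [PySem.Set.update]
  | cons x rest ih =>
      intro s hnd hf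
      have hx : x ∉ s := hf x (by simp)
      have hadd : PySem.Set.add s x = s ++ [x] := PySem.Set.add_of_not_mem hx
      simp only [PySem.Set.update, List.foldl_cons] at *
      rw [hadd]
      have := ih (s ++ [x]) hnd.of_cons (by
        intro y hy
        simp only [List.mem_append, List.mem_singleton]
        rintro (h1 | h2)
        · exact hf y (by simp [hy]) h1
        · exact (List.nodup_cons.mp hnd).1 (h2 ▸ hy))
      simpa [List.append_assoc] using this

-- main invariant of B's forward relocation loop.
lemma relocate_keys :
    ∀ (qs : List Int) (d : PySem.Dict Int (Option Int)), d.keys.Nodup →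
      (qs.foldl (fun d q => (d.erase q).insert q none) d).keys.reverse
        = PySem.Set.update (PySem.Set.ofList qs.reverse) d.keys.reverse := by
  intro qs
  induction qs with
  | nil =>
      intro d hnd
      simp only [List.foldl_nil, List.reverse_nil]
      have : (PySem.Set.ofList ([] : List Int)) = ([] : PySem.Set Int) := rfl
      rw [this]
      rw [update_nodup_fresh d.keys.reverse [] (by simpa using hnd) (by simp)]
      simp
  | cons q rest ih =>
      intro d hnd
      simp only [List.foldl_cons]
      rw [ih _ (nodup_keys_relocate_step d q hnd)]
      rw [keys_relocate_step]
      have hmem : q ∈ PySem.Set.add (PySem.Set.ofList rest.reverse) q :=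
        (PySem.Set.mem_add _ q q).mpr (Or.inr rfl)
      have hup : PySem.Set.update (PySem.Set.ofList rest.reverse)
            (q :: (d.keys.filter (fun k => k != q)).reverse)
          = PySem.Set.update (PySem.Set.add (PySem.Set.ofList rest.reverse) q)
            (d.keys.reverse) := by
        simp only [PySem.Set.update, List.foldl_cons]
        rw [← List.filter_reverse]
        exact update_filter_ne q d.keys.reverse _ hmem
      rw [List.reverse_append, List.reverse_singleton, List.singleton_append, hup]
      have hof : PySem.Set.ofList ((q :: rest).reverse)
          = PySem.Set.add (PySem.Set.ofList rest.reverse) q := by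
        simp [PySem.Set.ofList, List.reverse_cons, List.foldl_append]
      rw [hof]

-- ===== VERDICT (by name: the statement is the Claim_ definition above) =====
theorem simulationResult_spec : Claim_equal_simulationResult := by
  intro windows queries _
  unfold Spec_simulationResult simulationResult simulationResult_alt
  rw [PySem.List.slice?_none_none_neg_one]
  simp only [Option.getD_some]
  have hA := foldA_eq_update queries.reverse (PySem.Set.empty)
  rw [show (([] : List Int), (PySem.Set.empty : PySem.Set Int))
        = ((PySem.Set.empty : PySem.Set Int), (PySem.Set.empty : PySem.Set Int)) from rfl]
  simp only [hA]
  have hkeys :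
      (queries.foldl (fun (d : PySem.Dict Int (Option Int)) q => (d.erase q).insert q none)
        PySem.Dict.empty).keys.reverse
      = PySem.Set.ofList queries.reverse := by
    rw [relocate_keys queries PySem.Dict.empty (by simp [PySem.Dict.empty, PySem.Dict.keys])]
    rfl
  set od := queries.foldl (fun (d : PySem.Dict Int (Option Int)) q => (d.erase q).insert q none)
      PySem.Dict.empty with hod
  have hupd : PySem.Set.update (PySem.Set.empty : PySem.Set Int) queries.reverse
      = PySem.Set.ofList queries.reverse := rfl
  rw [hupd]
  have hc : ∀ w : Int, od.contains w
      = PySem.Set.contains (PySem.Set.ofList queries.reverse) w := by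
    intro w
    rw [PySem.Dict.contains_eq_decide_mem_keys]
    have : w ∈ od.keys ↔ w ∈ PySem.Set.ofList queries.reverse := by
      rw [← hkeys]; simp
    simp [PySem.Set.contains, List.contains_eq_mem, this]
  rw [← hkeys]
  simp only [hc, hkeys]
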